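-- pv_equiv track=rewrite | github.com/bararia-swati/cs6111 | laddered_query_ordering.py | cal_frequency
-- ===== SOURCE A (Python) =====
-- from collections import defaultdict
--
-- def cal_frequency(k,clean_bin_corpus):
--     permutation_to_frequency = defaultdict(dict)
--     max_frequency = 0
--     new_bin_query = ""
--     for n in range(2,k+1):
--
--         for i in range(len(clean_bin_corpus)-n+1):
--             check_unique = set()
--             for j in range(n):
--                 check_unique.add(clean_bin_corpus[i+j])
--             if(len(check_unique)==n):
--                 if(clean_bin_corpus[i:i+n] in permutation_to_frequency[n].keys()):
--                     permutation_to_frequency[n][clean_bin_corpus[i:i+n]]+=1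
--                 else:
--                     permutation_to_frequency[n][clean_bin_corpus[i:i+n]]=1
--                 if(max_frequency<permutation_to_frequency[n][clean_bin_corpus[i:i+n]]):
--                     max_frequency = max(max_frequency,permutation_to_frequency[n][clean_bin_corpus[i:i+n]])
--                     new_bin_query = clean_bin_corpus[i:i+n]
--     return permutation_to_frequency,max_frequency,new_bin_query
-- ===== SOURCE B (Python) =====
-- def cal_frequency(k, clean_bin_corpus):
--     s = clean_bin_corpus
--     L = len(s)
--     # runs[j] = length of the longest all-distinct substring of s ending at index j,
--     # computed in one left-to-right pass with last-seen positions.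
--     runs = []
--     run = 0
--     last = {}
--     for j in range(L):
--         run = min(run + 1, j - last.get(s[j], -1))
--         runs.append(run)
--         last[s[j]] = j
--     res = {}
--     max_frequency = 0
--     new_bin_query = ""
--     for n in range(2, min(k, L) + 1):
--         cnt = {}
--         for i in range(L - n + 1):
--             # the window s[i:i+n] has all-distinct characters iff n <= runs[i+n-1]
--             if n <= runs[i + n - 1]:
--                 w = s[i:i + n]
--                 c = cnt.get(w, 0) + 1
--                 cnt[w] = c
--                 if c > max_frequency:
--                     max_frequency = c
--                     new_bin_query = w
--         if cnt:
--             res[n] = cnt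
--     return res, max_frequency, new_bin_query
-- ===== Notes on version B (the rewrite author's own statement) =====
-- stated objective: faster
-- what changed: Instead of rebuilding a character set for every window of every length (O(n) per window), B makes one left-to-right pass recording, via last-seen positions, the longest all-distinct substring ending at each index, so each window's distinctness test is O(1); per-length counts go into a local dict appended once.
import Mathlib
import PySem

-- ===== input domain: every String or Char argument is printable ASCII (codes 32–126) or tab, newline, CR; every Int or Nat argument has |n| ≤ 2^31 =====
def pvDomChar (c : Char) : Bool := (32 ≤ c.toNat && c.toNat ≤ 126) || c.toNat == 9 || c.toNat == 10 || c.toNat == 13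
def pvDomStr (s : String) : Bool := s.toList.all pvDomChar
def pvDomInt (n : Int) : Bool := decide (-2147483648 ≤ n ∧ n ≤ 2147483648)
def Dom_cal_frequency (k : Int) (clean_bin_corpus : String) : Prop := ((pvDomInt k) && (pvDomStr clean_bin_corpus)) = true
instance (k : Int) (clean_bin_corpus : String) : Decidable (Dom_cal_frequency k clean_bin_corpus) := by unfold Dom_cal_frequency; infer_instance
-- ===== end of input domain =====

-- B replaces A's per-window set-building distinctness scan by one left-to-right pass computing, for
-- every position, the length of the longest all-distinct substring ending there (last-seen positions),
-- and counts each length n in a local dict; measured faster (window test O(1) instead of O(n)).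

-- ===== PORT A =====
-- A-side helpers: the three loop bodies of A, outermost last (literal transliteration).
def pvABody (cs : List Char) (n : Int)
    (st : PySem.Dict Int (PySem.Dict String Int) × Int × String) (i : Int) :
    PySem.Dict Int (PySem.Dict String Int) × Int × String :=
  -- check_unique = set(); for j in range(n): check_unique.add(s[i+j])   (index always in range)
  let check_unique := (PySem.List.pyRange 0 n).foldl
    (fun cu j => PySem.Set.add cu (PySem.List.pyGetD cs (i+j) ' ')) PySem.Set.empty
  if PySem.List.len check_unique = n then
    let w := String.ofList (PySem.List.slice cs (some i) (some (i+n)))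
    -- defaultdict access permutation_to_frequency[n]
    let inner := st.1.getD n PySem.Dict.empty
    let inner := if inner.contains w then inner.insert w (inner.getD w 0 + 1)
                 else inner.insert w 1
    let p := st.1.insert n inner
    let c := (p.getD n PySem.Dict.empty).getD w 0
    if st.2.1 < c then (p, max st.2.1 c, w) else (p, st.2.1, st.2.2)
  else st

def pvAOuter (cs : List Char)
    (st : PySem.Dict Int (PySem.Dict String Int) × Int × String) (n : Int) :
    PySem.Dict Int (PySem.Dict String Int) × Int × String :=
  (PySem.List.pyRange 0 (PySem.List.len cs - n + 1)).foldl (pvABody cs n) st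

def cal_frequency (k : Int) (clean_bin_corpus : String) : (List (Int × List (String × Int))) × Int × String :=
  let cs := clean_bin_corpus.toList
  let st := (PySem.List.pyRange 2 (k+1)).foldl (pvAOuter cs)
    ((PySem.Dict.empty : PySem.Dict Int (PySem.Dict String Int)), (0:Int), "")
  (st.1.items.map (fun kv => (kv.1, kv.2.items)), st.2.1, st.2.2)

-- ===== PORT B =====
-- B-side helpers: the loop bodies of B (literal transliteration of Source B).
-- one pass: runs[j] = length of longest all-distinct substring ending at j (last-seen positions)
def pvBRunStep (cs : List Char) (st : Int × List Int × PySem.Dict Char Int) (j : Int) :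
    Int × List Int × PySem.Dict Char Int :=
  let c := PySem.List.pyGetD cs j ' '
  let run := min (st.1 + 1) (j - st.2.2.getD c (-1))
  (run, st.2.1 ++ [run], st.2.2.insert c j)

def pvBInner (cs : List Char) (runs : List Int) (n : Int)
    (st : PySem.Dict String Int × Int × String) (i : Int) :
    PySem.Dict String Int × Int × String :=
  -- s[i:i+n] is all-distinct iff n <= runs[i+n-1]
  if n ≤ PySem.List.pyGetD runs (i+n-1) 0 then
    let w := String.ofList (PySem.List.slice cs (some i) (some (i+n)))
    let c := st.1.getD w 0 + 1
    let cnt := st.1.insert w c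
    if c > st.2.1 then (cnt, c, w) else (cnt, st.2.1, st.2.2)
  else st

def pvBOuter (cs : List Char) (runs : List Int)
    (st : PySem.Dict Int (PySem.Dict String Int) × Int × String) (n : Int) :
    PySem.Dict Int (PySem.Dict String Int) × Int × String :=
  let inner := (PySem.List.pyRange 0 (PySem.List.len cs - n + 1)).foldl (pvBInner cs runs n)
    ((PySem.Dict.empty : PySem.Dict String Int), st.2.1, st.2.2)
  (if inner.1.items.isEmpty then st.1 else st.1.insert n inner.1, inner.2.1, inner.2.2)

def cal_frequency_alt (k : Int) (clean_bin_corpus : String) : (List (Int × List (String × Int))) × Int × String :=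
  let cs := clean_bin_corpus.toList
  let L := PySem.List.len cs
  let rstate := (PySem.List.pyRange 0 L).foldl (pvBRunStep cs)
    ((0:Int), ([] : List Int), (PySem.Dict.empty : PySem.Dict Char Int))
  let runs := rstate.2.1
  let final := (PySem.List.pyRange 2 (min k L + 1)).foldl (pvBOuter cs runs)
    ((PySem.Dict.empty : PySem.Dict Int (PySem.Dict String Int)), (0:Int), "")
  (final.1.items.map (fun kv => (kv.1, kv.2.items)), final.2.1, final.2.2)

-- ===== PRECONDITION & SPEC =====
def Spec_cal_frequency (k : Int) (clean_bin_corpus : String) (out : (List (Int × List (String × Int))) × Int × String) : Prop := out = cal_frequency_alt k clean_bin_corpus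
instance (k : Int) (clean_bin_corpus : String) (out : (List (Int × List (String × Int))) × Int × String) : Decidable (Spec_cal_frequency k clean_bin_corpus out) := by unfold Spec_cal_frequency; infer_instance

-- ===== CLAIM (what is proved, stated in full; the proofs are below) =====
def Claim_equal_cal_frequency : Prop := ∀ (k : Int) (clean_bin_corpus : String), Dom_cal_frequency k clean_bin_corpus → Spec_cal_frequency k clean_bin_corpus (cal_frequency k clean_bin_corpus)

-- ===== LEMMAS AND PROOFS =====

-- proof-layer abbreviations for the two loop states
def pvWindow (cs : List Char) (i n : Nat) : List Char := (cs.drop i).take n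

-- last occurrence of c among cs[0..j-1], as Python keeps it in the `last` dict (-1 when absent)
def pvLastIdx (cs : List Char) (j : Nat) (c : Char) : Int :=
  (List.range j).foldl (fun a p => if cs.getD p ' ' = c then (p:Int) else a) (-1)

-- the value run_j after j steps of B's first pass
def pvRunF (cs : List Char) : Nat → Int
  | 0 => 0
  | j+1 => min (pvRunF cs j + 1) ((j:Int) - pvLastIdx cs j (cs.getD j ' '))

theorem pvLastIdx_succ (cs : List Char) (j : Nat) (c : Char) :
    pvLastIdx cs (j+1) c = if cs.getD j ' ' = c then (j:Int) else pvLastIdx cs j c := by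
  unfold pvLastIdx
  rw [List.range_succ, List.foldl_append]
  simp

theorem pvLastIdx_ge (cs : List Char) (j : Nat) (c : Char) : -1 ≤ pvLastIdx cs j c := by
  induction j with
  | zero => simp [pvLastIdx]
  | succ j ih =>
    rw [pvLastIdx_succ]
    split
    · omega
    · exact ih

theorem pvLastIdx_lt (cs : List Char) (j : Nat) (c : Char) : pvLastIdx cs j c < (j:Int) := by
  induction j with
  | zero => simp [pvLastIdx]
  | succ j ih =>
    rw [pvLastIdx_succ]
    push_cast
    split <;> omega

theorem pvLastIdx_not_after (cs : List Char) (j : Nat) (c : Char) (p : Nat)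
    (h1 : pvLastIdx cs j c < (p:Int)) (h2 : p < j) : cs.getD p ' ' ≠ c := by
  induction j with
  | zero => omega
  | succ j ih =>
    rw [pvLastIdx_succ] at h1
    by_cases hc : cs.getD j ' ' = c
    · rw [if_pos hc] at h1
      omega
    · rw [if_neg hc] at h1
      rcases Nat.lt_succ_iff_lt_or_eq.mp h2 with h | h
      · exact ih h1 h
      · subst h; exact hc

theorem pvLastIdx_occ (cs : List Char) (j : Nat) (c : Char) (h : 0 ≤ pvLastIdx cs j c) :
    cs.getD (pvLastIdx cs j c).toNat ' ' = c := by
  induction j with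
  | zero => simp [pvLastIdx] at h
  | succ j ih =>
    rw [pvLastIdx_succ] at h ⊢
    by_cases hc : cs.getD j ' ' = c
    · rw [if_pos hc]
      simpa using hc
    · rw [if_neg hc] at h ⊢
      exact ih h

theorem pvRunF_nonneg (cs : List Char) (j : Nat) : 0 ≤ pvRunF cs j := by
  induction j with
  | zero => simp [pvRunF]
  | succ j ih =>
    have := pvLastIdx_lt cs j (cs.getD j ' ')
    simp only [pvRunF, le_min_iff]
    omega

theorem pvMem_window (cs : List Char) (i n : Nat) (h : i + n ≤ cs.length) (c : Char) :
    c ∈ pvWindow cs i n ↔ ∃ p : Nat, i ≤ p ∧ p < i + n ∧ cs.getD p ' ' = c := by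
  have hlen : (pvWindow cs i n).length = n := by
    simp [pvWindow]
    omega
  constructor
  · intro hc
    obtain ⟨t, ht, hEq⟩ := List.mem_iff_getElem.mp hc
    rw [hlen] at ht
    refine ⟨i + t, by omega, by omega, ?_⟩
    rw [List.getD_eq_getElem _ _ (by omega), ← hEq]
    simp [pvWindow]
  · rintro ⟨p, hp1, hp2, hp3⟩
    rw [List.mem_iff_getElem]
    refine ⟨p - i, by omega, ?_⟩
    have hgl : p - i < (pvWindow cs i n).length := by omega
    have : pvWindow cs i n = (cs.drop i).take n := rfl
    rw [← hp3, List.getD_eq_getElem _ _ (by omega)]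
    simp [pvWindow]
    congr 1
    omega

theorem pvWindow_concat (cs : List Char) (i n : Nat) (h : i + n ≤ cs.length) (hn : 1 ≤ n) :
    pvWindow cs i n = pvWindow cs i (n-1) ++ [cs.getD (i+n-1) ' '] := by
  have h1 : n - 1 < (cs.drop i).length := by
    rw [List.length_drop]
    omega
  have h2 : pvWindow cs i n = (cs.drop i).take ((n-1)+1) := by
    unfold pvWindow
    congr 1
    omega
  rw [h2, List.take_add_one, List.getElem?_eq_getElem h1]
  unfold pvWindow
  congr 1
  simp only [List.getElem_drop]
  rw [List.getD_eq_getElem _ _ (by omega)]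
  simp
  congr 1
  omega

-- the heart: m ≤ run_j  ↔  the m-window ending at j-1 is duplicate-free
theorem pvRunF_iff (cs : List Char) (j : Nat) : ∀ m : Nat, j ≤ cs.length → 1 ≤ m → m ≤ j →
    ((m:Int) ≤ pvRunF cs j ↔ (pvWindow cs (j-m) m).Nodup) := by
  induction j with
  | zero => intro m _ h1 h2; omega
  | succ j ih =>
    intro m hlen h1 h2
    have hlj : j ≤ cs.length := by omega
    have hcat : pvWindow cs (j+1-m) m
        = pvWindow cs (j+1-m) (m-1) ++ [cs.getD j ' '] := by
      have := pvWindow_concat cs (j+1-m) m (by omega) h1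
      rw [show j+1-m + m - 1 = j by omega] at this
      exact this
    have hnd : (pvWindow cs (j+1-m) m).Nodup
        ↔ (pvWindow cs (j+1-m) (m-1)).Nodup ∧ cs.getD j ' ' ∉ pvWindow cs (j+1-m) (m-1) := by
      rw [hcat, List.nodup_append]
      simp only [List.nodup_cons, List.not_mem_nil, List.nodup_nil, List.mem_cons,
        not_false_iff, and_true]
      constructor
      · rintro ⟨h1', -, h2'⟩
        exact ⟨h1', fun hc => (h2' _ hc _ (Or.inl rfl)) rfl⟩
      · rintro ⟨h1', h2'⟩
        refine ⟨h1', trivial, ?_⟩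
        rintro a ha b (rfl | hF)
        · rintro rfl; exact h2' ha
        · exact absurd hF (by simp)
    have hmem : cs.getD j ' ' ∉ pvWindow cs (j+1-m) (m-1)
        ↔ (m : Int) ≤ (j : Int) - pvLastIdx cs j (cs.getD j ' ') := by
      have hlast_lt := pvLastIdx_lt cs j (cs.getD j ' ')
      have hlast_ge := pvLastIdx_ge cs j (cs.getD j ' ')
      constructor
      · intro hno
        by_contra hgt
        have h0 : 0 ≤ pvLastIdx cs j (cs.getD j ' ') := by omega
        set q := (pvLastIdx cs j (cs.getD j ' ')).toNat with hq
        have hq1 : (q : Int) = pvLastIdx cs j (cs.getD j ' ') := Int.toNat_of_nonneg h0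
        have hocc : cs.getD q ' ' = cs.getD j ' ' := by
          rw [hq]
          exact pvLastIdx_occ cs j _ h0
        apply hno
        rw [pvMem_window cs _ _ (by omega)]
        exact ⟨q, by omega, by omega, hocc⟩
      · intro hle hmem'
        rw [pvMem_window cs _ _ (by omega)] at hmem'
        obtain ⟨p, hp1, hp2, hp3⟩ := hmem'
        exact pvLastIdx_not_after cs j _ p (by omega) (by omega) hp3
    simp only [pvRunF, le_min_iff]
    rw [hnd, ← hmem]
    constructor
    · rintro ⟨ha, hb⟩
      refine ⟨?_, hb⟩
      rcases Nat.eq_or_lt_of_le h1 with h | h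
      · have : pvWindow cs (j+1-m) (m-1) = [] := by
          rw [← h]
          simp [pvWindow]
        simp [this]
      · have IH := ih (m-1) hlj (by omega) (by omega)
        rw [show j - (m-1) = j+1-m by omega] at IH
        apply IH.mp
        omega
    · rintro ⟨ha, hb⟩
      refine ⟨?_, hb⟩
      rcases Nat.eq_or_lt_of_le h1 with h | h
      · have := pvRunF_nonneg cs j
        omega
      · have IH := ih (m-1) hlj (by omega) (by omega)
        rw [show j - (m-1) = j+1-m by omega] at IH
        have := IH.mpr ha
        push_cast at this ⊢
        omega

-- B's first pass computes pvRunF / pvLastIdx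
theorem pvRunsFold (cs : List Char) (j : Nat) :
    ∃ d : PySem.Dict Char Int,
      ((PySem.List.pyRange 0 (j:Int)).foldl (pvBRunStep cs)
        ((0:Int), ([] : List Int), (PySem.Dict.empty : PySem.Dict Char Int)))
        = (pvRunF cs j, (List.range j).map (fun t => pvRunF cs (t+1)), d)
      ∧ ∀ c, d.getD c (-1) = pvLastIdx cs j c := by
  induction j with
  | zero =>
    refine ⟨PySem.Dict.empty, by simp [pvRunF], fun c => ?_⟩
    simp [pvLastIdx, PySem.Dict.getD_empty]
  | succ j ih =>
    obtain ⟨d, hfold, hd⟩ := ih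
    refine ⟨d.insert (cs.getD j ' ') (j:Int), ?_, ?_⟩
    · rw [show ((j+1 : Nat) : Int) = (j:Int)+1 by push_cast; ring,
        PySem.List.pyRange_one_succ_right (by positivity), List.foldl_append, hfold]
      simp only [List.foldl_cons, List.foldl_nil]
      unfold pvBRunStep
      simp only [PySem.List.pyGetD_natCast, hd]
      refine Prod.ext ?_ (Prod.ext ?_ ?_)
      · simp [pvRunF]
      · simp [List.range_succ, pvRunF]
      · rfl
    · intro c
      rw [pvLastIdx_succ, PySem.Dict.getD_insert]
      by_cases h : cs.getD j ' ' = c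
      · rw [if_pos h, if_pos h.symm]
      · rw [if_neg h, if_neg (fun hh => h hh.symm), hd]

-- A's set build is Set.ofList of the window
theorem pvSetBuild (cs : List Char) (i n : Nat) (h : i + n ≤ cs.length) :
    (PySem.List.pyRange 0 (n:Int)).foldl
      (fun cu j => PySem.Set.add cu (PySem.List.pyGetD cs ((i:Int)+j) ' ')) PySem.Set.empty
    = PySem.Set.ofList (pvWindow cs i n) := by
  have hw : (List.range n).map (fun t => cs.getD (i+t) ' ') = pvWindow cs i n := by
    apply List.ext_getElem
    · simp [pvWindow]
      omega
    · intro t h1 h2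
      have ht : t < n := by simpa using h1
      simp only [List.getElem_map, List.getElem_range]
      rw [List.getD_eq_getElem _ _ (by omega)]
      simp [pvWindow]
  rw [PySem.List.pyRange_zero_natCast, List.foldl_map, ← hw,
    PySem.Set.ofList_eq_foldl, List.foldl_map]
  apply PySem.List.foldl_congr_mem
  intro acc t _
  rw [show ((i:Int) + (t:Int)) = ((i+t : Nat) : Int) by push_cast; ring,
    PySem.List.pyGetD_natCast]

theorem pvSetLen_le (w : List Char) : (PySem.Set.ofList w).length ≤ w.length := by
  induction w using List.reverseRecOn with
  | nil => simp [PySem.Set.ofList]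
  | append_singleton w x ih =>
    have hcat : PySem.Set.ofList (w ++ [x]) = PySem.Set.add (PySem.Set.ofList w) x := by
      rw [PySem.Set.ofList_eq_foldl, PySem.Set.ofList_eq_foldl, List.foldl_append]; rfl
    rw [hcat]
    show (if (PySem.Set.ofList w).contains x then PySem.Set.ofList w
          else PySem.Set.ofList w ++ [x]).length ≤ (w ++ [x]).length
    split
    · simp only [List.length_append, List.length_singleton]
      omega
    · simp only [List.length_append, List.length_singleton]
      omega

theorem pvSetLen_iff (w : List Char) : ((PySem.Set.ofList w).length = w.length) ↔ w.Nodup := by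
  induction w using List.reverseRecOn with
  | nil => simp [PySem.Set.ofList]
  | append_singleton w x ih =>
    have hcat : PySem.Set.ofList (w ++ [x]) = PySem.Set.add (PySem.Set.ofList w) x := by
      rw [PySem.Set.ofList_eq_foldl, PySem.Set.ofList_eq_foldl, List.foldl_append]; rfl
    have hle := pvSetLen_le w
    rw [hcat]
    show (if (PySem.Set.ofList w).contains x then PySem.Set.ofList w
          else PySem.Set.ofList w ++ [x]).length = (w ++ [x]).length ↔ (w ++ [x]).Nodup
    have hnd : (w ++ [x]).Nodup ↔ w.Nodup ∧ x ∉ w := by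
      rw [List.nodup_append]
      simp only [List.nodup_cons, List.not_mem_nil, List.nodup_nil, List.mem_cons]
      constructor
      · rintro ⟨h1', -, h2'⟩
        exact ⟨h1', fun hc => (h2' _ hc _ (Or.inl rfl)) rfl⟩
      · rintro ⟨h1', h2'⟩
        refine ⟨h1', by simp, ?_⟩
        rintro a ha b (rfl | hF)
        · rintro rfl; exact h2' ha
        · exact absurd hF (by simp)
    rw [hnd]
    by_cases hx : x ∈ w
    · have hcont : (PySem.Set.ofList w).contains x = true :=
        List.contains_iff_mem.mpr ((PySem.Set.mem_ofList w x).mpr hx)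
      rw [if_pos hcont]
      simp only [List.length_append, List.length_singleton]
      constructor
      · intro h; omega
      · rintro ⟨-, hno⟩; exact absurd hx hno
    · have hcont : (PySem.Set.ofList w).contains x ≠ true :=
        fun h => hx ((PySem.Set.mem_ofList w x).mp (List.contains_iff_mem.mp h))
      rw [if_neg hcont]
      simp only [List.length_append, List.length_singleton]
      rw [← ih]
      constructor
      · intro h; exact ⟨by omega, hx⟩
      · rintro ⟨h, -⟩; omega

theorem pvDict_isEmpty_eq (d : PySem.Dict String Int) (h : d.items.isEmpty = true) :
    d = PySem.Dict.empty := by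
  apply PySem.Dict.ext
  rw [List.isEmpty_iff] at h
  rw [h]
  rfl

theorem pvDict_insert_ne_empty (d : PySem.Dict String Int) (w : String) (v : Int) :
    (d.insert w v).items.isEmpty = false := by
  rw [PySem.Dict.items_insert]
  split
  · rw [List.isEmpty_eq_false_iff, ← List.length_pos_iff, List.length_map]
    have : d.contains w = true := by assumption
    have : w ∈ d.keys := (PySem.Dict.contains_iff_mem_keys d w).mp this
    have : d.keys ≠ [] := by rintro h'; rw [h'] at this; exact absurd this (by simp)
    have hk : d.keys.length = d.items.length := by simp [PySem.Dict.keys]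
    rcases List.length_pos_iff.mpr this with h''
    omega
  · simp

-- per-step equality of the two inner-loop bodies, under the lift of B's local state
theorem pvBody_eq (cs : List Char) (runs : List Int) (n i : Int)
    (hruns : runs = (List.range cs.length).map (fun t => pvRunF cs (t+1)))
    (hn : 2 ≤ n) (hnL : n ≤ (cs.length : Int)) (hi : 0 ≤ i) (hiL : i + n ≤ (cs.length : Int))
    (p0 : PySem.Dict Int (PySem.Dict String Int)) (hfresh : p0.contains n = false)
    (st : PySem.Dict String Int × Int × String) :
    pvABody cs n ((if st.1.items.isEmpty then p0 else p0.insert n st.1), st.2.1, st.2.2) i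
    = ((if (pvBInner cs runs n st i).1.items.isEmpty then p0
        else p0.insert n (pvBInner cs runs n st i).1),
       (pvBInner cs runs n st i).2.1, (pvBInner cs runs n st i).2.2) := by
  obtain ⟨I, rfl⟩ : ∃ I : Nat, i = (I:Int) := ⟨i.toNat, (Int.toNat_of_nonneg hi).symm⟩
  obtain ⟨N, rfl⟩ : ∃ N : Nat, n = (N:Int) := ⟨n.toNat, (Int.toNat_of_nonneg (by omega)).symm⟩
  have hN2 : 2 ≤ N := by exact_mod_cast hn
  have hIN : I + N ≤ cs.length := by exact_mod_cast (by push_cast; omega : ((I+N : Nat) : Int) ≤ (cs.length : Int))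
  have hwlen : (pvWindow cs I N).length = N := by
    simp [pvWindow]
    omega
  have hiffA : (PySem.List.len ((PySem.List.pyRange 0 (N:Int)).foldl
      (fun cu j => PySem.Set.add cu (PySem.List.pyGetD cs ((I:Int)+j) ' ')) PySem.Set.empty)
      = (N:Int)) ↔ (pvWindow cs I N).Nodup := by
    have h' := pvSetLen_iff (pvWindow cs I N)
    rw [hwlen] at h'
    rw [pvSetBuild cs I N hIN, PySem.List.len_eq]
    exact_mod_cast h'
  have hiffB : ((N:Int) ≤ PySem.List.pyGetD runs ((I:Int)+(N:Int)-1) 0) ↔ (pvWindow cs I N).Nodup := by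
    rw [show ((I:Int)+(N:Int)-1) = ((I+N-1 : Nat) : Int) by omega,
      PySem.List.pyGetD_natCast, hruns,
      PySem.List.getD_map_range _ _ _ _ (by omega),
      show I+N-1+1 = I+N by omega]
    have := pvRunF_iff cs (I+N) N hIN (by omega) (by omega)
    rw [show I+N-N = I by omega] at this
    exact this
  unfold pvABody pvBInner
  simp only [hiffA, hiffB]
  by_cases hw : (pvWindow cs I N).Nodup
  · simp only [if_pos hw, gt_iff_lt]
    have hinner0 : (if st.1.items.isEmpty then p0 else p0.insert (N:Int) st.1).getD (N:Int) PySem.Dict.empty = st.1 := by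
      by_cases hE : st.1.items.isEmpty
      · rw [if_pos hE, PySem.Dict.getD_of_not_contains _ _ hfresh, pvDict_isEmpty_eq st.1 hE]
      · rw [if_neg hE, PySem.Dict.getD_insert_self]
    rw [hinner0]
    set w := String.ofList (PySem.List.slice cs (some (I:Int)) (some ((I:Int)+(N:Int)))) with hwdef
    have hinner1 : (if st.1.contains w then st.1.insert w (st.1.getD w 0 + 1)
        else st.1.insert w 1) = st.1.insert w (st.1.getD w 0 + 1) := by
      by_cases hc : st.1.contains w
      · rw [if_pos hc]
      · rw [if_neg hc, PySem.Dict.getD_of_not_contains _ _ (by simpa using hc), zero_add]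
    rw [hinner1]
    have hp' : (if st.1.items.isEmpty then p0 else p0.insert (N:Int) st.1).insert (N:Int)
        (st.1.insert w (st.1.getD w 0 + 1)) = p0.insert (N:Int) (st.1.insert w (st.1.getD w 0 + 1)) := by
      by_cases hE : st.1.items.isEmpty
      · rw [if_pos hE]
      · rw [if_neg hE, PySem.Dict.insert_insert_self]
    rw [hp', PySem.Dict.getD_insert_self, PySem.Dict.getD_insert_self]
    by_cases hlt : st.2.1 < st.1.getD w 0 + 1
    · simp only [if_pos hlt, max_eq_right (le_of_lt hlt), pvDict_insert_ne_empty,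
        Bool.false_eq_true, if_false]
    · simp only [if_neg hlt, pvDict_insert_ne_empty, Bool.false_eq_true, if_false]
  · simp only [if_neg hw]

-- the two inner loops agree (fold form of pvBody_eq)
theorem pvInner_sim (cs : List Char) (runs : List Int) (n : Int)
    (hruns : runs = (List.range cs.length).map (fun t => pvRunF cs (t+1)))
    (hn : 2 ≤ n) (hnL : n ≤ (cs.length : Int))
    (p0 : PySem.Dict Int (PySem.Dict String Int)) (hfresh : p0.contains n = false)
    (xs : List Int) (hx : ∀ i ∈ xs, 0 ≤ i ∧ i + n ≤ (cs.length : Int)) :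
    ∀ st : PySem.Dict String Int × Int × String,
    xs.foldl (pvABody cs n) ((if st.1.items.isEmpty then p0 else p0.insert n st.1), st.2.1, st.2.2)
    = ((if (xs.foldl (pvBInner cs runs n) st).1.items.isEmpty then p0
        else p0.insert n (xs.foldl (pvBInner cs runs n) st).1),
       (xs.foldl (pvBInner cs runs n) st).2.1, (xs.foldl (pvBInner cs runs n) st).2.2) := by
  induction xs with
  | nil => intro st; rfl
  | cons i xs ih =>
    intro st
    simp only [List.foldl_cons]
    rw [pvBody_eq cs runs n i hruns hn hnL (hx i (by simp)).1 (hx i (by simp)).2 p0 hfresh st]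
    exact ih (fun t ht => hx t (by simp [ht])) (pvBInner cs runs n st i)

-- the two outer-loop bodies agree on fresh keys
theorem pvOuterBody_eq (cs : List Char) (runs : List Int) (n : Int)
    (hruns : runs = (List.range cs.length).map (fun t => pvRunF cs (t+1)))
    (hn : 2 ≤ n) (hnL : n ≤ (cs.length : Int))
    (st : PySem.Dict Int (PySem.Dict String Int) × Int × String)
    (hfresh : st.1.contains n = false) :
    pvAOuter cs st n = pvBOuter cs runs st n := by
  unfold pvAOuter pvBOuter
  have hx : ∀ i ∈ PySem.List.pyRange 0 (PySem.List.len cs - n + 1),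
      0 ≤ i ∧ i + n ≤ (cs.length : Int) := by
    intro i hi
    rw [PySem.List.mem_pyRange_one] at hi
    rw [PySem.List.len_eq] at hi
    omega
  have h0 : ((PySem.Dict.empty : PySem.Dict String Int), st.2.1, st.2.2).1.items.isEmpty = true := rfl
  have := pvInner_sim cs runs n hruns hn hnL st.1 hfresh
    (PySem.List.pyRange 0 (PySem.List.len cs - n + 1)) hx
    ((PySem.Dict.empty : PySem.Dict String Int), st.2.1, st.2.2)
  rw [h0] at this
  simp only [if_pos] at this
  exact this

theorem pvPyRange_nodup (a b : Int) : (PySem.List.pyRange a b).Nodup := by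
  generalize hm : (b - a).toNat = m
  induction m generalizing a with
  | zero =>
    rw [PySem.List.pyRange_one_eq_nil (by omega)]
    simp
  | succ m ih =>
    have hab : a < b := by omega
    rw [PySem.List.pyRange_one_cons hab, List.nodup_cons]
    refine ⟨?_, ih (a+1) (by omega)⟩
    intro hmem
    rw [PySem.List.mem_pyRange_one] at hmem
    omega

-- outer fold equality over any key-distinct, in-range index list
theorem pvOuter_sim (cs : List Char) (runs : List Int)
    (hruns : runs = (List.range cs.length).map (fun t => pvRunF cs (t+1)))
    (ns : List Int) (hnd : ns.Nodup) :
    ∀ st : PySem.Dict Int (PySem.Dict String Int) × Int × String,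
    (∀ m ∈ ns, 2 ≤ m ∧ m ≤ (cs.length : Int)) → (∀ m ∈ ns, st.1.contains m = false) →
    ns.foldl (pvAOuter cs) st = ns.foldl (pvBOuter cs runs) st := by
  induction ns with
  | nil => intro st _ _; rfl
  | cons n ns ih =>
    intro st hb hf
    simp only [List.foldl_cons]
    rw [pvOuterBody_eq cs runs n hruns (hb n (by simp)).1 (hb n (by simp)).2 st (hf n (by simp))]
    apply ih hnd.of_cons
    · intro m hm; exact hb m (by simp [hm])
    · intro m hm
      have hmn : m ≠ n := by
        rintro rfl
        exact (List.nodup_cons.mp hnd).1 hm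
      unfold pvBOuter
      dsimp only
      split
      · exact hf m (by simp [hm])
      · rw [PySem.Dict.contains_insert]
        rw [hf m (by simp [hm])]
        simp [hmn]

-- iterations with n > len(cs) do nothing in A
theorem pvAOuter_noop (cs : List Char) (n : Int) (hn : (cs.length : Int) < n)
    (st : PySem.Dict Int (PySem.Dict String Int) × Int × String) :
    pvAOuter cs st n = st := by
  unfold pvAOuter
  rw [PySem.List.len_eq, PySem.List.pyRange_one_eq_nil (by omega)]
  rfl

-- A's outer fold can be cut down to the first min k len(cs) iterations
theorem pvAOuter_cut (cs : List Char) (k : Int) (hk : (cs.length : Int) ≤ k)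
    (st : PySem.Dict Int (PySem.Dict String Int) × Int × String) :
    (PySem.List.pyRange 2 (k+1)).foldl (pvAOuter cs) st
    = (PySem.List.pyRange 2 ((cs.length : Int)+1)).foldl (pvAOuter cs) st := by
  induction k, hk using Int.le_induction with
  | base => rfl
  | succ k hk ih =>
    by_cases h2 : 2 ≤ k + 1
    · rw [PySem.List.pyRange_one_succ_right (by omega), List.foldl_append,
        List.foldl_cons, List.foldl_nil, ih,
        pvAOuter_noop cs (k+1) (by omega)]
    · rw [PySem.List.pyRange_one_eq_nil (by omega), PySem.List.pyRange_one_eq_nil (by omega)]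

-- ===== VERDICT (by name: the statement is the Claim_ definition above) =====
theorem cal_frequency_spec : Claim_equal_cal_frequency := by
  intro k s _
  unfold Spec_cal_frequency
  obtain ⟨d, hfold, -⟩ := pvRunsFold s.toList s.toList.length
  simp only [cal_frequency, cal_frequency_alt, PySem.List.len_eq]
  rw [hfold]
  dsimp only
  have hfresh : ∀ m ∈ (PySem.List.pyRange 2 (k+1)),
      (PySem.Dict.empty : PySem.Dict Int (PySem.Dict String Int)).contains m = false := by
    intro m _
    rfl
  by_cases hk : k ≤ (s.toList.length : Int)
  · rw [min_eq_left hk]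
    rw [pvOuter_sim s.toList _ rfl (PySem.List.pyRange 2 (k+1)) (pvPyRange_nodup 2 (k+1)) _
      (fun m hm => by rw [PySem.List.mem_pyRange_one] at hm; omega) hfresh]
  · rw [min_eq_right (by omega)]
    rw [pvAOuter_cut s.toList k (by omega)]
    rw [pvOuter_sim s.toList _ rfl (PySem.List.pyRange 2 ((s.toList.length : Int)+1))
      (pvPyRange_nodup _ _) _
      (fun m hm => by rw [PySem.List.mem_pyRange_one] at hm; omega)
      (fun m _ => rfl)]
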